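-- pv_equiv track=rewrite | github.com/yiweihuang/Keyword-Cloud | helpers/kmap_tree_for_outline.py | build_level_n
-- ===== SOURCE A (Python) =====
-- from collections import OrderedDict
--
-- def build_level_n(pre, next_):
--     all_ = ()
--     if next_ != None:
--         pre = OrderedDict(sorted(pre[1].items()))
--         next_ = OrderedDict(sorted(next_[1].items()))
--         for next_key in next_: # layer
--             for next_item in next_[next_key]: # order
--                 tup = ()
--                 for pre_key in pre:
--                     for pre_item in pre[pre_key]:
--                         if next_key > pre_key:
--                             if pre_item != next_item:
--                                 tup = ((pre_item, next_item),)
--                 if tup: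
--                     if tup[0] not in all_:
--                         all_ = all_ + tup
--     return all_
-- ===== SOURCE B (Python) =====
-- def build_level_n(pre, next_):
--     if next_ is None:
--         return ()
--     # flatten the pre-level dict into (key, item) pairs in sorted-key order
--     pre_d = pre[1]
--     flat = []
--     for k in sorted(pre_d):
--         for it in pre_d[k]:
--             flat.append((k, it))
--     keys = [k for k, _ in flat]
--     next_d = next_[1]
--     out = []
--     seen = set()
--     for nk in sorted(next_d):
--         # binary search: lo = first index with keys[lo] >= nk
--         lo, hi = 0, len(keys)
--         while lo < hi:
--             mid = (lo + hi) // 2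
--             if keys[mid] < nk:
--                 lo = mid + 1
--             else:
--                 hi = mid
--         for ni in next_d[nk]:
--             # last pre item with key < nk and item != ni: scan back over the run equal to ni
--             j = lo - 1
--             while j >= 0 and flat[j][1] == ni:
--                 j -= 1
--             if j >= 0:
--                 pair = (flat[j][1], ni)
--                 if pair not in seen:
--                     seen.add(pair)
--                     out.append(pair)
--     return tuple(out)
-- ===== Notes on version B (the rewrite author's own statement) =====
-- stated objective: faster
-- what changed: Instead of re-scanning every pre-level item for each next-level item and doing a linear membership test on the result tuple, B flattens the sorted pre dict once, binary-searches the largest prefix of keys below each next key, scans backwards only over the run of items equal to the next item, and deduplicates with a set.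
import Mathlib
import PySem

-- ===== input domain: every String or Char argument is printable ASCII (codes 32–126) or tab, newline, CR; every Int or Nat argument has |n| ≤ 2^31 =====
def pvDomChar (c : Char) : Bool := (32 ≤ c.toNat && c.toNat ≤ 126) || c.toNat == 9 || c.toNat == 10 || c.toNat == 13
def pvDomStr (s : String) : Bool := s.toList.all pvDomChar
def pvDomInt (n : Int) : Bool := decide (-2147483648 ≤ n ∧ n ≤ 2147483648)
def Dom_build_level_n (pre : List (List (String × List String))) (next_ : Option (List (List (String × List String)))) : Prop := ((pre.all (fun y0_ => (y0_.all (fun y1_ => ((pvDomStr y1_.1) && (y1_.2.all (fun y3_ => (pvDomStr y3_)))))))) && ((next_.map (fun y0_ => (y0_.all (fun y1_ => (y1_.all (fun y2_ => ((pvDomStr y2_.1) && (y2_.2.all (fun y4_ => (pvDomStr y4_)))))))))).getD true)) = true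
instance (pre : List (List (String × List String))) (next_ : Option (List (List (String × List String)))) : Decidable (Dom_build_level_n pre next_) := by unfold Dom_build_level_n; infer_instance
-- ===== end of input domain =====

-- B replaces A's rescan of every pre-level item per next-level item (and the linear
-- membership test on the growing result) by a one-time flatten of the sorted pre dict,
-- a binary search per next key and a set for dedup; equal output proved below.

-- ===== PORT A =====
-- A's inner double loop over the sorted pre dict: the last (pre_item, next_item) with
-- pre_key < next_key and pre_item != next_item survives ('next_key > pre_key' is 'pre_key < next_key').
def pvAinner (nk ni : String) (preItems : List (String × List String)) : Option (String × String) :=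
  preItems.foldl (fun tup p =>
    p.2.foldl (fun tup pit =>
      if p.1 < nk then (if pit ≠ ni then some (pit, ni) else tup) else tup) tup) none

-- 'OrderedDict(sorted(d.items()))' then iterating keys and looking each key up is iterating the
-- sorted items; dict keys are distinct, so Python's tuple sort is the stable sort by the key.
def build_level_n (pre : List (List (String × List String))) (next_ : Option (List (List (String × List String)))) : List (String × String) :=
  match next_ with
  | none => []
  | some nx =>
    let preD := PySem.List.sorted (PySem.Dict.ofList ((PySem.List.pyGet? pre 1).getD [])).items (fun p => p.1)
    let nxD := PySem.List.sorted (PySem.Dict.ofList ((PySem.List.pyGet? nx 1).getD [])).items (fun p => p.1)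
    nxD.foldl (fun all p =>
      p.2.foldl (fun all ni =>
        match pvAinner p.1 ni preD with
        | none => all
        | some t => if t ∈ all then all else all ++ [t]) all) []

-- ===== PORT B =====
-- flat list of (key, item) pairs of the sorted pre dict (B's first loop)
def pvFlat (preD : List (String × List String)) : List (String × String) :=
  preD.flatMap (fun p => p.2.map (fun it => (p.1, it)))

-- B's hand-written binary search: first index in [lo, hi) with keys[index] >= nk
def pvBisect (keys : List String) (nk : String) (lo hi : Nat) : Nat :=
  if h : lo < hi then
    if keys.getD ((lo + hi) / 2) "" < nk then pvBisect keys nk ((lo + hi) / 2 + 1) hi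
    else pvBisect keys nk lo ((lo + hi) / 2)
  else lo
termination_by hi - lo
decreasing_by all_goals omega

-- B's backward scan from index j-1 over the run of items equal to ni
def pvScanBack (flat : List (String × String)) (ni : String) : Nat → Option String
  | 0 => none
  | j + 1 => if (flat.getD j ("", "")).2 = ni then pvScanBack flat ni j else some (flat.getD j ("", "")).2

def build_level_n_alt (pre : List (List (String × List String))) (next_ : Option (List (List (String × List String)))) : List (String × String) :=
  match next_ with
  | none => []
  | some nx =>
    let preD := PySem.List.sorted (PySem.Dict.ofList ((PySem.List.pyGet? pre 1).getD [])).items (fun p => p.1)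
    let flat := pvFlat preD
    let keys := flat.map (fun q => q.1)
    let nxD := PySem.List.sorted (PySem.Dict.ofList ((PySem.List.pyGet? nx 1).getD [])).items (fun p => p.1)
    (nxD.foldl (fun (st : List (String × String) × PySem.Set (String × String)) p =>
      let lo := pvBisect keys p.1 0 keys.length
      p.2.foldl (fun st ni =>
        match pvScanBack flat ni lo with
        | none => st
        | some pit =>
          if (pit, ni) ∈ st.2 then st
          else (st.1 ++ [(pit, ni)], PySem.Set.add st.2 (pit, ni))) st)
      (([] : List (String × String)), PySem.Set.empty)).1

-- ===== PRECONDITION & SPEC =====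
-- Pre_ excludes exactly the crash inputs: with next_ not None, A evaluates pre[1] and next_[1],
-- an IndexError when either list has fewer than 2 elements.
def Pre_build_level_n (pre : List (List (String × List String))) (next_ : Option (List (List (String × List String)))) : Prop :=
  next_ = none ∨ (2 ≤ pre.length ∧ 2 ≤ (next_.getD []).length)
instance (pre : List (List (String × List String))) (next_ : Option (List (List (String × List String)))) : Decidable (Pre_build_level_n pre next_) := by unfold Pre_build_level_n; infer_instance

def pvWitness_build_level_n : (List (List (String × List String))) × (Option (List (List (String × List String)))) :=
  ([[("a", ["x"])], [("b", ["y", "z"])]], some [[("c", ["z"])], [("d", ["y", "w"])]])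

def Spec_build_level_n (pre : List (List (String × List String))) (next_ : Option (List (List (String × List String)))) (out : List (String × String)) : Prop := out = build_level_n_alt pre next_
instance (pre : List (List (String × List String))) (next_ : Option (List (List (String × List String)))) (out : List (String × String)) : Decidable (Spec_build_level_n pre next_ out) := by unfold Spec_build_level_n; infer_instance

-- ===== CLAIM (what is proved, stated in full; the proofs are below) =====
def Claim_equal_build_level_n : Prop := ∀ (pre : List (List (String × List String))) (next_ : Option (List (List (String × List String)))), Dom_build_level_n pre next_ → Pre_build_level_n pre next_ → Spec_build_level_n pre next_ (build_level_n pre next_)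

-- ===== LEMMAS AND PROOFS =====

-- A's nested loop over the grouped items is the same fold over the flattened pairs
lemma pv_nested_eq_flat (nk ni : String) (l : List (String × List String)) (init : Option (String × String)) :
    l.foldl (fun tup p =>
      p.2.foldl (fun tup pit =>
        if p.1 < nk then (if pit ≠ ni then some (pit, ni) else tup) else tup) tup) init
    = (pvFlat l).foldl (fun tup q =>
        if q.1 < nk then (if q.2 ≠ ni then some (q.2, ni) else tup) else tup) init := by
  induction l generalizing init with
  | nil => simp [pvFlat]
  | cons p l ih =>
    simp only [pvFlat, List.flatMap_cons, List.foldl_append, List.foldl_map, List.foldl_cons]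
    exact ih _

-- a "keep the last qualifying element" fold is getLast? of the filtered list
lemma pv_foldl_lastpick (nk ni : String) (l : List (String × String)) (init : Option (String × String)) :
    l.foldl (fun tup q =>
      if q.1 < nk then (if q.2 ≠ ni then some (q.2, ni) else tup) else tup) init
    = ((l.filter (fun q => decide (q.1 < nk) && decide (¬ q.2 = ni))).getLast?).elim init
        (fun q => some (q.2, ni)) := by
  induction l using List.reverseRecOn generalizing init with
  | nil => simp
  | append_singleton l x ih =>
    rw [List.foldl_append, List.filter_append]
    simp only [List.foldl_cons, List.foldl_nil, List.filter_cons, List.filter_nil]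
    by_cases h1 : x.1 < nk
    · by_cases h2 : x.2 = ni
      · rw [if_pos h1, if_neg (not_not_intro h2),
          if_neg (by simp [h1, h2] : ¬ ((decide (x.1 < nk) && decide (¬ x.2 = ni)) = true)),
          List.append_nil]
        exact ih init
      · rw [if_pos h1, if_pos h2,
          if_pos (by simp [h1, h2] : (decide (x.1 < nk) && decide (¬ x.2 = ni)) = true),
          List.getLast?_concat]
        rfl
    · rw [if_neg h1,
        if_neg (by simp [h1] : ¬ ((decide (x.1 < nk) && decide (¬ x.2 = ni)) = true)),
        List.append_nil]
      exact ih init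

-- a filter whose predicate holds exactly on the first r positions is take r
lemma pv_filter_eq_take {α : Type} (P : α → Bool) (l : List α) (r : Nat) (hr : r ≤ l.length)
    (h : ∀ (i : Nat) (hi : i < l.length), (P l[i] = true ↔ i < r)) : l.filter P = l.take r := by
  induction l generalizing r with
  | nil => simp
  | cons x l ih =>
    cases r with
    | zero =>
      have hall : ∀ a ∈ x :: l, ¬ P a = true := by
        intro a ha
        obtain ⟨i, hi, rfl⟩ := List.mem_iff_getElem.mp ha
        simp [h i hi]
      simp [List.filter_eq_nil_iff.mpr hall]
    | succ s =>
      have hx : P x = true := by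
        have := h 0 (by simp)
        simpa using this.mpr (Nat.succ_pos s)
      have hs : s ≤ l.length := by simpa using hr
      have htail : ∀ (i : Nat) (hi : i < l.length), (P l[i] = true ↔ i < s) := by
        intro i hi
        have := h (i + 1) (by simpa using Nat.succ_lt_succ hi)
        simpa [Nat.succ_lt_succ_iff] using this
      simp [List.filter_cons, hx, ih s hs htail]

-- the flattened list of a list sorted by key is sorted by key
lemma pv_flat_pairwise (l : List (String × List String)) (hp : l.Pairwise (fun a b => a.1 ≤ b.1)) :
    (pvFlat l).Pairwise (fun a b : String × String => a.1 ≤ b.1) := by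
  induction l with
  | nil => simp [pvFlat]
  | cons p l ih =>
    rcases List.pairwise_cons.mp hp with ⟨hhead, htail⟩
    simp only [pvFlat, List.flatMap_cons]
    rw [List.pairwise_append]
    refine ⟨?_, ih htail, ?_⟩
    · exact List.pairwise_iff_getElem.mpr (by intro i j hi hj hij; simp)
    · intro a ha b hb
      obtain ⟨it, hit, rfl⟩ := List.mem_map.mp ha
      obtain ⟨q, hq, hbq⟩ := List.mem_flatMap.mp hb
      obtain ⟨it2, hit2, rfl⟩ := List.mem_map.mp hbq
      simpa using hhead q hq

-- correctness of B's binary search on a sorted key list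
lemma pvBisect_spec (keys : List String) (nk : String) (lo hi : Nat)
    (h1 : lo ≤ hi) (h2 : hi ≤ keys.length)
    (hlo : ∀ (i : Nat) (hi' : i < keys.length), i < lo → keys[i] < nk)
    (hhi : ∀ (i : Nat) (hi' : i < keys.length), hi ≤ i → ¬ keys[i] < nk)
    (hs : keys.Pairwise (· ≤ ·)) :
    pvBisect keys nk lo hi ≤ keys.length ∧
      ∀ (i : Nat) (hi' : i < keys.length), (keys[i] < nk ↔ i < pvBisect keys nk lo hi) := by
  induction lo, hi using pvBisect.induct keys nk with
  | case1 lo hi h hcond ih =>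
    have hmidlt : (lo + hi) / 2 < keys.length := by omega
    have hcond' : keys[(lo + hi) / 2] < nk := by
      rwa [List.getD_eq_getElem keys "" hmidlt] at hcond
    rw [pvBisect]
    simp only [dif_pos h, if_pos hcond]
    apply ih (by omega) h2
    · intro i hi' hilt
      rcases Nat.lt_or_ge i ((lo + hi) / 2) with hcase | hcase
      · exact lt_of_le_of_lt (List.pairwise_iff_getElem.mp hs i _ hi' hmidlt hcase) hcond'
      · have heq : i = (lo + hi) / 2 := by omega
        subst heq; exact hcond'
    · exact hhi
  | case2 lo hi h hcond ih =>
    have hmidlt : (lo + hi) / 2 < keys.length := by omega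
    have hcond' : ¬ keys[(lo + hi) / 2] < nk := by
      rwa [List.getD_eq_getElem keys "" hmidlt] at hcond
    rw [pvBisect]
    simp only [dif_pos h, if_neg hcond]
    apply ih (by omega) (by omega) hlo
    intro i hi' hge hlt
    rcases Nat.lt_or_ge ((lo + hi) / 2) i with hc2 | hc2
    · exact hcond' (lt_of_le_of_lt (List.pairwise_iff_getElem.mp hs _ i hmidlt hi' hc2) hlt)
    · have heq : i = (lo + hi) / 2 := by omega
      subst heq; exact hcond' hlt
  | case3 lo hi h =>
    rw [pvBisect]
    simp only [dif_neg h]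
    refine ⟨by omega, ?_⟩
    intro i hi'
    constructor
    · intro hlt
      by_contra hge
      exact hhi i hi' (by omega) hlt
    · intro hilt
      exact hlo i hi' hilt

-- B's backward scan is getLast? of the non-ni items of the prefix
lemma pvScanBack_spec (flat : List (String × String)) (ni : String) :
    ∀ (j : Nat), j ≤ flat.length →
      pvScanBack flat ni j
        = (((flat.take j).filter (fun q => decide (¬ q.2 = ni))).getLast?).map (fun q => q.2) := by
  intro j
  induction j with
  | zero => intro _; simp [pvScanBack]
  | succ s ih =>
    intro h
    have hs : s < flat.length := by omega
    have hget : flat.getD s ("", "") = flat[s] := List.getD_eq_getElem flat ("", "") hs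
    rw [List.take_add_one, List.getElem?_eq_getElem hs]
    simp only [pvScanBack, hget, Option.toList_some, List.filter_append]
    by_cases hq : flat[s].2 = ni
    · simp only [if_pos hq]
      rw [ih (by omega)]
      simp [hq]
    · simp [hq]

-- per next (key, item): A's rescan result equals B's bisect + backward scan
lemma pv_per_item (preD : List (String × List String)) (hp : preD.Pairwise (fun a b => a.1 ≤ b.1))
    (nk ni : String) :
    pvAinner nk ni preD
      = (pvScanBack (pvFlat preD) ni
          (pvBisect ((pvFlat preD).map (fun q => q.1)) nk 0 ((pvFlat preD).map (fun q => q.1)).length)).map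
          (fun pit => (pit, ni)) := by
  have hfp := pv_flat_pairwise preD hp
  have hkp : ((pvFlat preD).map (fun q => q.1)).Pairwise (· ≤ ·) := List.pairwise_map.mpr hfp
  have hlen : ((pvFlat preD).map (fun q => q.1)).length = (pvFlat preD).length := by simp
  obtain ⟨hble, hbiff⟩ := pvBisect_spec ((pvFlat preD).map (fun q => q.1)) nk 0
    ((pvFlat preD).map (fun q => q.1)).length (Nat.zero_le _) le_rfl
    (by intro i _ hi0; omega)
    (by intro i hi' hge; omega)
    hkp
  set lo := pvBisect ((pvFlat preD).map (fun q => q.1)) nk 0 ((pvFlat preD).map (fun q => q.1)).length with hlodef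
  have hloflat : lo ≤ (pvFlat preD).length := hlen ▸ hble
  have hfilter1 : (pvFlat preD).filter (fun q => decide (q.1 < nk)) = (pvFlat preD).take lo := by
    apply pv_filter_eq_take _ _ lo hloflat
    intro i hi
    have := hbiff i (by omega)
    simpa using this
  have hcomb : (pvFlat preD).filter (fun q => decide (q.1 < nk) && decide (¬ q.2 = ni))
      = ((pvFlat preD).take lo).filter (fun q => decide (¬ q.2 = ni)) := by
    rw [← hfilter1, List.filter_filter]
    apply List.filter_congr
    intro a _
    exact Bool.and_comm _ _
  rw [pvAinner, pv_nested_eq_flat, pv_foldl_lastpick, pvScanBack_spec (pvFlat preD) ni lo hloflat, hcomb]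
  cases hl : (((pvFlat preD).take lo).filter (fun q => decide (¬ q.2 = ni))).getLast? with
  | none => simp
  | some q => simp

-- the inner fold over one next key, with invariant out = seen
lemma pv_inner_acc (preD : List (String × List String)) (flat : List (String × String)) (lo : Nat)
    (nk : String)
    (hitem : ∀ ni : String, pvAinner nk ni preD = (pvScanBack flat ni lo).map (fun pit => (pit, ni)))
    (its : List String) (acc : List (String × String)) :
    its.foldl (fun (st : List (String × String) × PySem.Set (String × String)) ni =>
        match pvScanBack flat ni lo with
        | none => st
        | some pit =>
          if (pit, ni) ∈ st.2 then st
          else (st.1 ++ [(pit, ni)], PySem.Set.add st.2 (pit, ni))) (acc, acc)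
      = (its.foldl (fun all ni =>
          match pvAinner nk ni preD with
          | none => all
          | some t => if t ∈ all then all else all ++ [t]) acc,
         its.foldl (fun all ni =>
          match pvAinner nk ni preD with
          | none => all
          | some t => if t ∈ all then all else all ++ [t]) acc) := by
  induction its generalizing acc with
  | nil => simp
  | cons ni its ih =>
    simp only [List.foldl_cons, hitem ni]
    cases hscan : pvScanBack flat ni lo with
    | none => simpa using ih acc
    | some pit =>
      simp only [Option.map_some]
      by_cases hmem : (pit, ni) ∈ acc
      · simp only [if_pos hmem]
        exact ih acc
      · simp only [if_neg hmem, PySem.Set.add_of_not_mem hmem]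
        exact ih (acc ++ [(pit, ni)])

-- the outer fold: B's (out, seen) pair stays (acc, acc) and tracks A's accumulator
lemma pv_outer_acc (preD : List (String × List String)) (hp : preD.Pairwise (fun a b => a.1 ≤ b.1))
    (nxD : List (String × List String)) (acc : List (String × String)) :
    nxD.foldl (fun (st : List (String × String) × PySem.Set (String × String)) p =>
        p.2.foldl (fun st ni =>
          match pvScanBack (pvFlat preD) ni
              (pvBisect ((pvFlat preD).map (fun q => q.1)) p.1 0 ((pvFlat preD).map (fun q => q.1)).length) with
          | none => st
          | some pit =>
            if (pit, ni) ∈ st.2 then st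
            else (st.1 ++ [(pit, ni)], PySem.Set.add st.2 (pit, ni))) st) (acc, acc)
      = (nxD.foldl (fun all p =>
          p.2.foldl (fun all ni =>
            match pvAinner p.1 ni preD with
            | none => all
            | some t => if t ∈ all then all else all ++ [t]) all) acc,
         nxD.foldl (fun all p =>
          p.2.foldl (fun all ni =>
            match pvAinner p.1 ni preD with
            | none => all
            | some t => if t ∈ all then all else all ++ [t]) all) acc) := by
  induction nxD generalizing acc with
  | nil => simp
  | cons p nxD ih =>
    simp only [List.foldl_cons]
    rw [pv_inner_acc preD (pvFlat preD)
      (pvBisect ((pvFlat preD).map (fun q => q.1)) p.1 0 ((pvFlat preD).map (fun q => q.1)).length)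
      p.1 (fun ni => pv_per_item preD hp p.1 ni) p.2 acc]
    exact ih _

-- ===== VERDICT (by name: the statement is the Claim_ definition above) =====
theorem build_level_n_spec : Claim_equal_build_level_n := by
  intro pre next_ _ _
  unfold Spec_build_level_n
  cases next_ with
  | none => rfl
  | some nx =>
    unfold build_level_n build_level_n_alt
    simp only
    rw [show (PySem.Set.empty : PySem.Set (String × String)) = ([] : List (String × String)) from rfl]
    rw [pv_outer_acc _ (PySem.List.sorted_pairwise _ _)]
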